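-- pv_equiv track=rewrite | github.com/Ananth1-9/CSC-110 | Programming projects/infofile.py | count_capitalized
-- ===== SOURCE A (Python) =====
-- def count_capitalized(word_counts):
--     """
--     Counts the number of UNIQUE capitalized and
--     non-capitalized words.
--     Args:
--         word_counts (dict): A dictionary with words
--         as keys and their counts as values.
--     Returns:
--         tuple: A tuple containing counts of
--         capitalized and non-capitalized words.
--     """
--     cap = 0
--     non_cap = 0
--     for word in word_counts:
--         if len(word) > 0 and word[0].isupper():
--             cap += 1
--         else:
--             non_cap += 1
--     return (cap, non_cap)
-- ===== SOURCE B (Python) =====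
-- def count_capitalized(word_counts):
--     # Group words by their first character (one histogram pass), then tally
--     # the histogram: a word is capitalized iff its first character is.
--     hist = {}
--     for word in word_counts:
--         key = word[:1]
--         hist[key] = hist.get(key, 0) + 1
--     cap = 0
--     total = 0
--     for key, n in hist.items():
--         total += n
--         if key != "" and key[0].isupper():
--             cap += n
--     return (cap, total - cap)
-- ===== Notes on version B (the rewrite author's own statement) =====
-- stated objective: alternative
-- what changed: Instead of classifying each word in one pass with two counters, B builds a histogram keyed by each word's first character (word[:1]) and then derives the capitalized count by summing the histogram entries whose key is an uppercase letter, and the non-capitalized count as total minus capitalized.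
import Mathlib
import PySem

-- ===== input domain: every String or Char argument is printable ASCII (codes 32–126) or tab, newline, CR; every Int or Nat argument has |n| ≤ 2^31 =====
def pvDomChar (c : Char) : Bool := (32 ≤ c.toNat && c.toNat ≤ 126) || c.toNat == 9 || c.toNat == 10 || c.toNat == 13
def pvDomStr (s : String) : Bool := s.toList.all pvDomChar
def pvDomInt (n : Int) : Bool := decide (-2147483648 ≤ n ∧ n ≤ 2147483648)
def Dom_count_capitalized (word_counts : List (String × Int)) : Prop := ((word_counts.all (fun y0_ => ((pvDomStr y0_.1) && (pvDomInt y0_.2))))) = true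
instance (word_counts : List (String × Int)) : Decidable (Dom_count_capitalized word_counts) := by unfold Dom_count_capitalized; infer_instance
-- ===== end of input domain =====

-- B groups words by first character into a histogram and tallies it, instead of A's two-counter single pass.

-- ===== PORT A =====
-- 'len(word) > 0 and word[0].isupper()'
def pyIsCapWord (w : String) : Bool :=
  (0 < PySem.Str.len w) &&
    (match PySem.Str.pyGet? w 0 with
     | some c => PySem.Chars.isupper c
     | none => false)

def count_capitalized (word_counts : List (String × Int)) : Int × Int :=
  word_counts.foldl
    (fun (s : Int × Int) p =>
      if pyIsCapWord p.1 then (s.1 + 1, s.2) else (s.1, s.2 + 1))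
    (0, 0)

-- ===== PORT B =====
-- 'key != "" and key[0].isupper()'
def pvKeyIsCap (k : String) : Bool :=
  (!(k == "")) &&
    (match PySem.Str.pyGet? k 0 with
     | some c => PySem.Chars.isupper c
     | none => false)

def count_capitalized_alt (word_counts : List (String × Int)) : Int × Int :=
  -- hist[word[:1]] = hist.get(word[:1], 0) + 1
  let hist : PySem.Dict String Int :=
    word_counts.foldl
      (fun d p =>
        let k := PySem.Str.slice p.1 none (some 1)
        d.insert k (d.getD k 0 + 1))
      PySem.Dict.empty
  -- for key, n in hist.items(): total += n; if key != "" and key[0].isupper(): cap += n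
  let r : Int × Int :=
    hist.items.foldl
      (fun (s : Int × Int) kn =>
        (if pvKeyIsCap kn.1 then s.1 + kn.2 else s.1, s.2 + kn.2))
      (0, 0)
  (r.1, r.2 - r.1)

-- ===== PRECONDITION & SPEC =====
def Spec_count_capitalized (word_counts : List (String × Int)) (out : Int × Int) : Prop := out = count_capitalized_alt word_counts
instance (word_counts : List (String × Int)) (out : Int × Int) : Decidable (Spec_count_capitalized word_counts out) := by unfold Spec_count_capitalized; infer_instance

-- ===== CLAIM (what is proved, stated in full; the proofs are below) =====
def Claim_equal_count_capitalized : Prop := ∀ (word_counts : List (String × Int)), Dom_count_capitalized word_counts → Spec_count_capitalized word_counts (count_capitalized word_counts)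

-- ===== LEMMAS AND PROOFS =====

-- A's loop computes (countP, length - countP).
theorem count_cap_foldl (l : List (String × Int)) (a b : Int) :
    l.foldl (fun (s : Int × Int) p =>
      if pyIsCapWord p.1 then (s.1 + 1, s.2) else (s.1, s.2 + 1)) (a, b)
    = (a + (l.countP (fun p => pyIsCapWord p.1) : Int),
       b + ((l.length : Int) - (l.countP (fun p => pyIsCapWord p.1) : Int))) := by
  induction l generalizing a b with
  | nil => simp
  | cons h t ih =>
    simp only [List.foldl_cons, List.countP_cons, List.length_cons]
    by_cases hc : pyIsCapWord h.1
    · simp [hc, ih]; ring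
    · simp [hc, ih]; ring

-- the classification of a word agrees with the classification of its first-character key
theorem key_cap_spec (w : String) :
    pvKeyIsCap (PySem.Str.slice w none (some 1)) = pyIsCapWord w := by
  obtain ⟨cs, rfl⟩ : ∃ cs, w = String.ofList cs := ⟨w.toList, by simp⟩
  unfold pvKeyIsCap pyIsCapWord
  have hsl : PySem.List.slice cs none (some (1:Int)) = cs.take 1 := by
    simpa using PySem.List.slice_to_natCast cs 1
  cases cs with
  | nil => simp [pysem, PySem.Chars.pyGet?, hsl]
  | cons c t => simp [pysem, PySem.Chars.pyGet?, hsl, String.ext_iff]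

-- B's tally loop computes the two sums.
theorem tally_foldl (l : List (String × Int)) (a b : Int) :
    l.foldl (fun (s : Int × Int) kn =>
      (if pvKeyIsCap kn.1 then s.1 + kn.2 else s.1, s.2 + kn.2)) (a, b)
    = (a + (l.map (fun kn => if pvKeyIsCap kn.1 then kn.2 else 0)).sum,
       b + (l.map (·.2)).sum) := by
  induction l generalizing a b with
  | nil => simp
  | cons h t ih =>
    simp only [List.foldl_cons, List.map_cons, List.sum_cons]
    by_cases hc : pvKeyIsCap h.1
    · simp [hc, ih, add_assoc]
    · simp [hc, ih, add_assoc]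

-- summing an if-then-else over a list is summing over the filtered list
theorem sum_map_ite_eq_filter {α : Type} (p : α → Bool) (f : α → Int) (l : List α) :
    (l.map (fun x => if p x then f x else 0)).sum = ((l.filter p).map f).sum := by
  induction l with
  | nil => rfl
  | cons h t ih => by_cases hc : p h <;> simp [hc, ih]

-- sum of (filtered) multiplicities over any Nodup enumeration of the distinct elements
theorem sum_counts_filter (ks : List String) (S : List String) (p : String → Bool)
    (hnd : S.Nodup) (hmem : ∀ x, x ∈ S ↔ x ∈ ks) :
    ((S.filter p).map (fun k => (ks.count k : Int))).sum = (ks.countP p : Int) := by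
  have hperm : S.Perm ks.dedup := by
    rw [List.perm_ext_iff_of_nodup hnd (List.nodup_dedup ks)]
    intro x; rw [hmem, List.mem_dedup]
  have h2 : ((S.filter p).map (fun k => ks.count k)).sum
      = ((ks.dedup.filter p).map (fun k => ks.count k)).sum :=
    ((hperm.filter p).map _).sum_eq
  have h3 := List.sum_map_count_dedup_filter_eq_countP p ks
  have : ((S.filter p).map (fun k => ks.count k)).sum = ks.countP p := by
    rw [h2]; simpa using h3
  rw [show ((S.filter p).map (fun k => (ks.count k : Int)))
      = ((S.filter p).map (fun k => ks.count k)).map (fun n : Nat => (n : Int)) from by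
        simp [List.map_map, Function.comp]]
  rw [← Nat.cast_list_sum, this]

-- ===== VERDICT (by name: the statement is the Claim_ definition above) =====
theorem count_capitalized_spec : Claim_equal_count_capitalized := by
  intro wc _
  unfold Spec_count_capitalized count_capitalized count_capitalized_alt
  change wc.foldl (fun (s : Int × Int) p =>
      if pyIsCapWord p.1 then (s.1 + 1, s.2) else (s.1, s.2 + 1)) (0, 0)
    = (((wc.foldl (fun d p =>
          let k := PySem.Str.slice p.1 none (some 1)
          (d.insert k (d.getD k 0 + 1) : PySem.Dict String Int)) PySem.Dict.empty).items.foldl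
        (fun (s : Int × Int) kn =>
          (if pvKeyIsCap kn.1 then s.1 + kn.2 else s.1, s.2 + kn.2)) (0, 0)).1,
       ((wc.foldl (fun d p =>
          let k := PySem.Str.slice p.1 none (some 1)
          (d.insert k (d.getD k 0 + 1) : PySem.Dict String Int)) PySem.Dict.empty).items.foldl
        (fun (s : Int × Int) kn =>
          (if pvKeyIsCap kn.1 then s.1 + kn.2 else s.1, s.2 + kn.2)) (0, 0)).2 -
       ((wc.foldl (fun d p =>
          let k := PySem.Str.slice p.1 none (some 1)
          (d.insert k (d.getD k 0 + 1) : PySem.Dict String Int)) PySem.Dict.empty).items.foldl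
        (fun (s : Int × Int) kn =>
          (if pvKeyIsCap kn.1 then s.1 + kn.2 else s.1, s.2 + kn.2)) (0, 0)).1)
  have hhist : (wc.foldl (fun d p =>
        let k := PySem.Str.slice p.1 none (some 1)
        (d.insert k (d.getD k 0 + 1) : PySem.Dict String Int)) PySem.Dict.empty)
      = PySem.Dict.counter (wc.map fun p => PySem.Str.slice p.1 none (some 1)) := by
    rw [← PySem.Dict.foldl_insert_getD_add_one_eq_counter, List.foldl_map]
  rw [count_cap_foldl, hhist, PySem.Dict.items_counter, tally_foldl]
  set ks := wc.map (fun p => PySem.Str.slice p.1 none (some 1)) with hks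
  have hS : ∀ x, x ∈ PySem.Set.ofList ks ↔ x ∈ ks := fun x => PySem.Set.mem_ofList ks x
  have hnd : (PySem.Set.ofList ks).Nodup := PySem.Set.nodup_ofList ks
  have hcap : (((PySem.Set.ofList ks).map (fun k => (k, (ks.count k : Int)))).map
      (fun kn => if pvKeyIsCap kn.1 then kn.2 else 0)).sum = (ks.countP pvKeyIsCap : Int) := by
    rw [List.map_map]
    rw [show ((fun kn : String × Int => if pvKeyIsCap kn.1 then kn.2 else 0) ∘
          (fun k => (k, (ks.count k : Int))))
        = (fun k => if pvKeyIsCap k then (ks.count k : Int) else 0) from rfl]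
    rw [sum_map_ite_eq_filter pvKeyIsCap (fun k => (ks.count k : Int)) (PySem.Set.ofList ks)]
    exact sum_counts_filter ks _ pvKeyIsCap hnd hS
  have htot : (((PySem.Set.ofList ks).map (fun k => (k, (ks.count k : Int)))).map (·.2)).sum
      = (ks.length : Int) := by
    rw [List.map_map]
    have := sum_counts_filter ks (PySem.Set.ofList ks) (fun _ => true) hnd hS
    simpa [Function.comp] using this
  have hcnt : ks.countP pvKeyIsCap = wc.countP (fun p => pyIsCapWord p.1) := by
    rw [hks, List.countP_map]
    exact List.countP_congr (fun p _ => by simp [Function.comp, key_cap_spec])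
  have hlen : ks.length = wc.length := by rw [hks, List.length_map]
  simp only [hcap, htot, hcnt, hlen, Prod.mk.injEq]
  exact ⟨trivial, by ring⟩
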